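-- pv_equiv track=rewrite | github.com/louisfghbvc/Leetcode | Prefix/2155. All Divisions With the Highest Score of a Binary Array.py | getDivisionIndices
-- ===== SOURCE A (Python) =====
-- from typing import List
--
-- def getDivisionIndices(nums: List[int]) -> List[int]:
--
--     # first count the numbers of one
--     one = nums.count(1)
--
--     # second go for loop
--     # record the ans, record the maximum score
--
--     zero = 0
--     mx_score = 0
--     ans = []
--
--     for i in range(len(nums)+1):
--         cur = zero + one
--         if cur > mx_score:
--             mx_score = cur
--             ans = [i]
--         elif cur == mx_score:
--             ans += i,
--
--         if i != len(nums):
--             zero += nums[i] == 0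
--             one -= nums[i] == 1
--
--     return ans
-- ===== SOURCE B (Python) =====
-- from typing import List
--
-- def getDivisionIndices(nums: List[int]) -> List[int]:
--     # prefix-zero table: pz[i] = count of zeros among nums[:i]
--     pz = [0]
--     for v in nums:
--         pz.append(pz[-1] + (v == 0))
--     # suffix-one table: so[i] = count of ones among nums[i:]
--     so = [0]
--     for v in reversed(nums):
--         so.append(so[-1] + (v == 1))
--     so.reverse()
--     scores = [a + b for a, b in zip(pz, so)]
--     best = max(scores)
--     return [i for i, s in enumerate(scores) if s == best]
-- ===== Notes on version B (the rewrite author's own statement) =====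
-- stated objective: alternative
-- what changed: A tracks the running max and answer list in one interleaved pass that updates zero/one counters while scanning; B instead builds explicit prefix-zero and suffix-one count tables (two scans plus a reversed scan), combines them into a score list, and then takes max(scores) and filters the indices attaining it.
import Mathlib
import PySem

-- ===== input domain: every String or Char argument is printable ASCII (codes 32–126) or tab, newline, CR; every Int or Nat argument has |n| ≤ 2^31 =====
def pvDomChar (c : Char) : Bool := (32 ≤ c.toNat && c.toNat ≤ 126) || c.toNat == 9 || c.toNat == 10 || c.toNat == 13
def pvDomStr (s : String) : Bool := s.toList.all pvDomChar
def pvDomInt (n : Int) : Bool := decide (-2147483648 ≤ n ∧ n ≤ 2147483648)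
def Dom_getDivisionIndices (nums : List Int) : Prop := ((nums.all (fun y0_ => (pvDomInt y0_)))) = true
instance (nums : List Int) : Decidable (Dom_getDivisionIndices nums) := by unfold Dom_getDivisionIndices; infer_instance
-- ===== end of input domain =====

-- B replaces A's single interleaved max-tracking pass by explicit prefix-zero / suffix-one
-- count tables combined into a score list, then max-and-filter (objective: alternative).

-- ===== PORT A =====
-- A-side helper: the if/elif update of (mx_score, ans) inside A's loop
def pvSelA (mx : Int) (ans : List Int) (cur i : Int) : Int × List Int :=
  if cur > mx then (cur, [i])
  else if cur = mx then (mx, ans ++ [i])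
  else (mx, ans)

-- A-side helper: the body of A's for-loop; state = (zero, one, mx_score, ans).
-- nums[i] is read only when i ≠ len(nums), so the index is always in range and
-- pyGetD's default is never used.
def pvBodyA (nums : List Int) (st : Int × Int × Int × List Int) (i : Int) :
    Int × Int × Int × List Int :=
  let cur := st.1 + st.2.1
  let ma := pvSelA st.2.2.1 st.2.2.2 cur i
  if i ≠ (nums.length : Int) then
    (st.1 + (if PySem.List.pyGetD nums i 0 = 0 then 1 else 0),
     st.2.1 - (if PySem.List.pyGetD nums i 0 = 1 then 1 else 0), ma.1, ma.2)
  else (st.1, st.2.1, ma.1, ma.2)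

def getDivisionIndices (nums : List Int) : List Int :=
  let one : Int := PySem.List.count nums 1
  ((PySem.List.pyRange 0 ((nums.length : Int) + 1) 1).foldl (pvBodyA nums)
      (0, one, 0, [])).2.2.2

-- ===== PORT B =====
-- acc is always nonempty in both scans (they start from [0]), so pyGetD's default
-- for acc[-1] is never used; scores is nonempty, so max? is always `some`
-- (Python's max raises only on an empty sequence).
def getDivisionIndices_alt (nums : List Int) : List Int :=
  let pz := nums.foldl
    (fun acc v => acc ++ [PySem.List.pyGetD acc (-1) 0 + (if v = 0 then (1:Int) else 0)]) [0]
  let so := (nums.reverse.foldl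
    (fun acc v => acc ++ [PySem.List.pyGetD acc (-1) 0 + (if v = 1 then (1:Int) else 0)]) [0]).reverse
  let scores := (pz.zip so).map (fun p => p.1 + p.2)
  let best := (PySem.List.max? scores id).getD 0
  ((PySem.List.enumerate scores 0).filter (fun p => p.2 == best)).map (fun p => p.1)

-- ===== PRECONDITION & SPEC =====
def Spec_getDivisionIndices (nums : List Int) (out : List Int) : Prop := out = getDivisionIndices_alt nums
instance (nums : List Int) (out : List Int) : Decidable (Spec_getDivisionIndices nums out) := by unfold Spec_getDivisionIndices; infer_instance

-- ===== CLAIM (what is proved, stated in full; the proofs are below) =====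
def Claim_equal_getDivisionIndices : Prop := ∀ (nums : List Int), Dom_getDivisionIndices nums → Spec_getDivisionIndices nums (getDivisionIndices nums)

-- ===== LEMMAS AND PROOFS =====

-- 0/1 indicators of the `== 0` / `== 1` tests
def pvBz (v : Int) : Int := if v = 0 then 1 else 0
def pvBo (v : Int) : Int := if v = 1 then 1 else 0

def pvOnes (l : List Int) : Int := (l.map pvBo).sum
def pvZeros (l : List Int) : Int := (l.map pvBz).sum

-- reference score list: scores of all divisions of l, given z zeros to its left
def pvS : List Int → Int → List Int
  | [], z => [z]
  | v :: t, z => (z + pvOnes (v :: t)) :: pvS t (z + pvBz v)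

-- generic running-sum scan (the shape of both of B's table-building loops)
def pvScan (b : Int → Int) : List Int → Int → List Int
  | [], z => [z]
  | v :: t, z => z :: pvScan b t (z + b v)

-- suffix-one table
def pvOL : List Int → List Int
  | [] => [0]
  | v :: t => pvOnes (v :: t) :: pvOL t

-- indices (counting from k) of the elements equal to M
def pvEqIdx : List Int → Int → Int → List Int
  | [], _, _ => []
  | s :: t, k, M => (if s = M then [k] else []) ++ pvEqIdx t (k + 1) M

-- A's select loop over a score list
def pvResSel : List Int → Int → Int → List Int → Int × List Int
  | [], _, mx, ans => (mx, ans)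
  | s :: t, k, mx, ans => pvResSel t (k + 1) (pvSelA mx ans s k).1 (pvSelA mx ans s k).2

theorem pvScan_foldl (b : Int → Int) :
    ∀ (l xs : List Int) (z : Int),
      l.foldl (fun acc v => acc ++ [PySem.List.pyGetD acc (-1) 0 + b v]) (xs ++ [z])
        = xs ++ pvScan b l z := by
  intro l
  induction l with
  | nil => intro xs z; simp [pvScan]
  | cons v t ih =>
      intro xs z
      simp only [List.foldl_cons, PySem.List.pyGetD_neg_one_append_singleton, pvScan]
      have := ih (xs ++ [z]) (z + b v)
      rw [List.append_assoc] at this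
      simpa using this

theorem pvScan_snoc (b : Int → Int) :
    ∀ (xs : List Int) (v z : Int),
      pvScan b (xs ++ [v]) z = pvScan b xs z ++ [z + (xs.map b).sum + b v] := by
  intro xs
  induction xs with
  | nil => intro v z; simp [pvScan]
  | cons w t ih =>
      intro v z
      simp only [List.cons_append, pvScan, List.map_cons, List.sum_cons, ih]
      simp only [List.cons.injEq, true_and]
      congr 2
      ring

theorem pvOL_eq (l : List Int) :
    (pvScan pvBo l.reverse 0).reverse = pvOL l := by
  induction l with
  | nil => simp [pvScan, pvOL]
  | cons v t ih =>
      simp only [List.reverse_cons, pvScan_snoc, List.reverse_append, List.reverse_cons,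
        List.reverse_nil, List.nil_append, List.cons_append, pvOL]
      rw [ih]
      congr 1
      simp only [pvOnes, List.map_cons, List.sum_cons, List.map_reverse, List.sum_reverse]
      ring

theorem pvZip_eq : ∀ (l : List Int) (z : Int),
    ((pvScan pvBz l z).zip (pvOL l)).map (fun p => p.1 + p.2) = pvS l z := by
  intro l
  induction l with
  | nil => intro z; simp [pvScan, pvOL, pvS]
  | cons v t ih =>
      intro z
      simp only [pvScan, pvOL, List.zip_cons_cons, List.map_cons, pvS, ih]

theorem pvMax?_cons : ∀ (t : List Int) (a : Int),
    PySem.List.max? (a :: t) id = some (t.foldl max a) := by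
  intro t
  induction t with
  | nil => intro a; rfl
  | cons s t ih =>
      intro a
      have h1 : PySem.List.max? (a :: s :: t) id = PySem.List.max? (max a s :: t) id := by
        simp only [PySem.List.max?, List.foldl_cons]
        congr 1
        show (if id a < id s then some s else some a) = some (max a s)
        by_cases h : (a : Int) < s
        · rw [if_pos (show id a < id s from h)]
          congr 1
          omega
        · rw [if_neg (show ¬ id a < id s from h)]
          congr 1
          omega
      rw [h1, ih, List.foldl_cons]

theorem pvFilt_eq : ∀ (l : List Int) (k M : Int),
    ((PySem.List.enumerate l k).filter (fun p => p.2 == M)).map (fun p => p.1)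
      = pvEqIdx l k M := by
  intro l
  induction l with
  | nil => intro k M; simp [PySem.List.enumerate_nil, pvEqIdx]
  | cons s t ih =>
      intro k M
      simp only [PySem.List.enumerate_cons, List.filter_cons, pvEqIdx]
      by_cases h : s = M
      · simp [h, ih]
      · simp [h, ih]

theorem pvResSel_eq : ∀ (t : List Int) (k mx : Int) (ans : List Int),
    pvResSel t k mx ans
      = (t.foldl max mx,
         (if mx = t.foldl max mx then ans else []) ++ pvEqIdx t k (t.foldl max mx)) := by
  intro t
  induction t with
  | nil => intro k mx ans; simp [pvResSel, pvEqIdx]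
  | cons s t ih =>
      intro k mx ans
      simp only [List.foldl_cons, pvEqIdx]
      rcases lt_trichotomy mx s with h1 | h2 | h3
      · -- a strictly larger score resets the answer list
        have hsel : pvSelA mx ans s k = (s, [k]) := by simp [pvSelA, h1]
        have hmax : max mx s = s := by omega
        rw [show pvResSel (s :: t) k mx ans
            = pvResSel t (k + 1) (pvSelA mx ans s k).1 (pvSelA mx ans s k).2 from rfl, hsel]
        simp only [ih, hmax]
        have hle := (PySem.List.le_foldl_max t s).1
        rw [if_neg (by omega : ¬ mx = t.foldl max s), List.nil_append]
      · -- an equal score appends its index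
        subst h2
        have hsel : pvSelA mx ans mx k = (mx, ans ++ [k]) := by simp [pvSelA]
        rw [show pvResSel (mx :: t) k mx ans
            = pvResSel t (k + 1) (pvSelA mx ans mx k).1 (pvSelA mx ans mx k).2 from rfl, hsel]
        simp only [ih, max_self]
        by_cases hF : mx = t.foldl max mx
        · simp only [if_pos hF, List.append_assoc]
        · simp only [if_neg hF, List.nil_append]
      · -- a strictly smaller score changes nothing
        have hsel : pvSelA mx ans s k = (mx, ans) := by
          simp only [pvSelA]
          rw [if_neg (by omega : ¬ s > mx), if_neg (by omega : ¬ s = mx)]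
        have hmax : max mx s = mx := by omega
        rw [show pvResSel (s :: t) k mx ans
            = pvResSel t (k + 1) (pvSelA mx ans s k).1 (pvSelA mx ans s k).2 from rfl, hsel]
        simp only [ih, hmax]
        have hle := (PySem.List.le_foldl_max t mx).1
        rw [if_neg (by omega : ¬ s = t.foldl max mx), List.nil_append]

theorem pvALoop : ∀ (l pre : List Int) (z mx : Int) (ans : List Int),
    (PySem.List.pyRange (pre.length : Int) (((pre ++ l).length : Int) + 1) 1).foldl
        (pvBodyA (pre ++ l)) (z, pvOnes l, mx, ans)
      = (z + pvZeros l, 0, pvResSel (pvS l z) (pre.length : Int) mx ans) := by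
  intro l
  induction l with
  | nil =>
      intro pre z mx ans
      rw [List.append_nil, PySem.List.pyRange_one_singleton]
      simp only [List.foldl_cons, List.foldl_nil, pvBodyA, pvSelA]
      simp [pvOnes, pvZeros, pvS, pvResSel, pvSelA]
  | cons v t ih =>
      intro pre z mx ans
      have hlen : ((pre ++ v :: t).length : Int) = (pre.length : Int) + (t.length : Int) + 1 := by
        simp; omega
      rw [PySem.List.pyRange_one_cons (by omega)]
      simp only [List.foldl_cons]
      have hne : ((pre.length : Int) ≠ ((pre ++ v :: t).length : Int)) := by omega
      have hget : PySem.List.pyGetD (pre ++ v :: t) (pre.length : Int) 0 = v := by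
        rw [PySem.List.pyGetD_natCast]
        simp [List.getD]
      have hbody : pvBodyA (pre ++ v :: t) (z, pvOnes (v :: t), mx, ans) (pre.length : Int)
          = (z + pvBz v, pvOnes t,
             (pvSelA mx ans (z + pvOnes (v :: t)) (pre.length : Int)).1,
             (pvSelA mx ans (z + pvOnes (v :: t)) (pre.length : Int)).2) := by
        have hz : (z + if v = (0:Int) then (1:Int) else 0) = z + pvBz v := by simp [pvBz]
        have ho : (pvOnes (v :: t) - if v = (1:Int) then (1:Int) else 0) = pvOnes t := by
          simp only [pvOnes, List.map_cons, List.sum_cons, pvBo]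
          ring
        simp only [pvBodyA, hget, if_pos hne, hz, ho]
      rw [hbody]
      have hsplit : pre ++ v :: t = (pre ++ [v]) ++ t := by simp
      have hlen2 : (((pre ++ [v]).length : Int)) = (pre.length : Int) + 1 := by simp
      rw [hsplit, show (pre.length : Int) + 1 = ((pre ++ [v]).length : Int) from hlen2.symm]
      rw [ih (pre ++ [v]) (z + pvBz v) _ _]
      rw [hlen2]
      have hz2 : z + pvBz v + pvZeros t = z + pvZeros (v :: t) := by
        simp only [pvZeros, List.map_cons, List.sum_cons]
        ring
      rw [hz2]
      rfl

theorem pvCount (l : List Int) : ((List.count (1 : Int) l : Nat) : Int) = pvOnes l := by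
  induction l with
  | nil => simp [pvOnes]
  | cons v t ih =>
      simp only [pvOnes, List.map_cons, List.sum_cons]
      simp only [pvOnes] at ih
      rw [List.count_cons]
      push_cast
      rw [ih]
      by_cases h : v = 1
      · simp [h, pvBo]
        omega
      · simp [h, pvBo]

theorem pvOnes_nonneg (l : List Int) : 0 ≤ pvOnes l := by
  induction l with
  | nil => simp [pvOnes]
  | cons v t ih =>
      simp only [pvOnes, List.map_cons, List.sum_cons]
      simp only [pvOnes] at ih
      have : 0 ≤ pvBo v := by simp only [pvBo]; split <;> omega
      omega

theorem pvS_head (l : List Int) (z : Int) : ∃ tl, pvS l z = (z + pvOnes l) :: tl := by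
  cases l with
  | nil => exact ⟨[], by simp [pvS, pvOnes]⟩
  | cons v t => exact ⟨pvS t (z + pvBz v), rfl⟩

-- ===== VERDICT (by name: the statement is the Claim_ definition above) =====
theorem getDivisionIndices_spec : Claim_equal_getDivisionIndices := by
  intro nums _
  simp only [Spec_getDivisionIndices, getDivisionIndices, getDivisionIndices_alt]
  -- A side
  have hones : (PySem.List.count nums 1 : Int) = pvOnes nums := by
    rw [PySem.List.count_eq]; exact pvCount nums
  have hA := pvALoop nums [] 0 0 []
  simp only [List.nil_append, List.length_nil, Nat.cast_zero] at hA
  rw [hones, hA]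
  -- B side: the two scans are pvScan, the score list is pvS
  have hpz : nums.foldl
      (fun acc v => acc ++ [PySem.List.pyGetD acc (-1) 0 + (if v = 0 then (1:Int) else 0)]) [0]
      = pvScan pvBz nums 0 := by
    have := pvScan_foldl pvBz nums [] 0
    simp only [List.nil_append] at this
    rw [← this]
    simp [pvBz]
  have hso : (nums.reverse.foldl
      (fun acc v => acc ++ [PySem.List.pyGetD acc (-1) 0 + (if v = 1 then (1:Int) else 0)]) [0]).reverse
      = pvOL nums := by
    have := pvScan_foldl pvBo nums.reverse [] 0
    simp only [List.nil_append] at this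
    rw [← pvOL_eq nums, ← this]
    simp [pvBo]
  rw [pvResSel_eq]
  rw [hpz, hso, pvZip_eq]
  -- the head of the score list is the total number of ones, which is ≥ 0
  obtain ⟨tl, hS⟩ := pvS_head nums 0
  rw [hS, pvMax?_cons]
  simp only [Option.getD_some, List.foldl_cons]
  rw [pvFilt_eq]
  have hnn : max (0 : Int) (0 + pvOnes nums) = 0 + pvOnes nums := by
    have := pvOnes_nonneg nums
    omega
  simp only [hnn]
  simp [ite_self, List.nil_append]
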